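-- pv_equiv track=rewrite | github.com/AnnaVitkina/transformation-dhl-3 | transform_other_tabs.py | _gogreen_longest_prefix_country
-- ===== SOURCE A (Python) =====
-- def _gogreen_longest_prefix_country(name, name_to_code):
--     """
--     If ``name`` starts with a dictionary key (longest keys first, case-insensitive), return
--     (code, rest_after_key). Rest continues after a comma separator.
--     """
--     name = name.strip()
--     if not name:
--         return None
--     keys = sorted(name_to_code.keys(), key=len, reverse=True)
--     nu = name.upper()
--     for k in keys:
--         if not k or len(k) > len(name):
--             continue
--         ku = k.upper()
--         if nu[: len(k)] != ku:
--             continue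
--         tail = name[len(k) :].strip()
--         if tail == '':
--             return (name_to_code[k], '')
--         if tail[0] == ',':
--             return (name_to_code[k], tail[1:].strip())
--     return None
-- ===== SOURCE B (Python) =====
-- def _gogreen_longest_prefix_country(name, name_to_code):
--     """Hash-index by uppercased key, then probe prefixes of name from the longest
--     useful length (capped by the longest key) down to 1; no sort, no per-candidate
--     scan of the key list."""
--     name = name.strip()
--     if not name:
--         return None
--     nu = name.upper()
--     index = {}
--     for k, code in name_to_code.items():
--         index.setdefault(k.upper(), code)
--     m = 0
--     for k in name_to_code:
--         if len(k) > m: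
--             m = len(k)
--     for L in range(min(len(name), m), 0, -1):
--         code = index.get(nu[:L])
--         if code is None:
--             continue
--         tail = name[L:].strip()
--         if tail == '':
--             return (code, '')
--         if tail[0] == ',':
--             return (code, tail[1:].strip())
--     return None
-- ===== Notes on version B (the rewrite author's own statement) =====
-- stated objective: alternative
-- what changed: B replaces A's sort-keys-by-length-then-scan with a hash index: it builds a dict from uppercased key to code (first occurrence wins) and probes the uppercased prefixes of name from the longest useful length (capped by the longest key) down to 1, so no sorting and no scan over the key list per candidate.
import Mathlib
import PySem

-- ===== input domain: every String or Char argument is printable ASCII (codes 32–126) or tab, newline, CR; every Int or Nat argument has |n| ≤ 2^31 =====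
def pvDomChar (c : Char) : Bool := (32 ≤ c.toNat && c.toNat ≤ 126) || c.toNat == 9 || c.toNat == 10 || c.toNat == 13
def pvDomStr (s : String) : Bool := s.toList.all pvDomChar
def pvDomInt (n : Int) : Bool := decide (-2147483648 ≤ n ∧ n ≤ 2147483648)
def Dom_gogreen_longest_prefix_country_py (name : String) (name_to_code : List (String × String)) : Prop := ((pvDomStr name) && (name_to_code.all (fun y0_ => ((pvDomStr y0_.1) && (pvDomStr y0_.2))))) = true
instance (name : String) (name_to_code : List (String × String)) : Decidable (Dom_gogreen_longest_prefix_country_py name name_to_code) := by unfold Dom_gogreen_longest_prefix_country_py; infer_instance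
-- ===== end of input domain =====

-- B replaces A's sort-keys-by-length-then-scan with a hash index keyed by the uppercased
-- key (first occurrence wins) probed at each prefix of name, longest first (objective: alternative).

-- ===== PORT A =====
-- A's for-loop over the sorted key list; name_to_code[k] is ported as getD k "" — k always
-- comes from d.keys here, so Python's KeyError is unreachable.
def pvLoopA (nameS nu : String) (d : PySem.Dict String String) : List String → Option (String × String)
  | [] => none
  | k :: rest =>
    if k = "" ∨ PySem.Str.len k > PySem.Str.len nameS then pvLoopA nameS nu d rest
    else
      let ku := PySem.Str.upper k
      if PySem.Str.slice nu none (some (PySem.Str.len k)) ≠ ku then pvLoopA nameS nu d rest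
      else
        let tail := PySem.Str.strip (PySem.Str.slice nameS (some (PySem.Str.len k)) none)
        if tail = "" then some (d.getD k "", "")
        else if PySem.Str.pyGet? tail 0 = some ',' then  -- tail ≠ "" here, so tail[0] cannot raise
          some (d.getD k "", PySem.Str.strip (PySem.Str.slice tail (some 1) none))
        else pvLoopA nameS nu d rest

def gogreen_longest_prefix_country_py (name : String) (name_to_code : List (String × String)) : Option (String × String) :=
  let name := PySem.Str.strip name
  if name = "" then none
  else
    let d := PySem.Dict.ofList name_to_code
    let keys := PySem.List.sorted d.keys (fun k => PySem.Str.len k) true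
    let nu := PySem.Str.upper name
    pvLoopA name nu d keys

-- ===== PORT B =====
-- B's first loop: build the index dict, setdefault keeps the first occurrence of each uppercased key.
def pvIndexB (items : List (String × String)) : PySem.Dict String String :=
  items.foldl (fun ix kc => ix.setdefault (PySem.Str.upper kc.1) kc.2) PySem.Dict.empty

-- B's second loop: probe the prefixes, over the list range(len(name), 0, -1).
def pvLoopB (nameS nu : String) (ix : PySem.Dict String String) : List Int → Option (String × String)
  | [] => none
  | L :: rest =>
    match ix.get? (PySem.Str.slice nu none (some L)) with
    | none => pvLoopB nameS nu ix rest
    | some code =>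
      let tail := PySem.Str.strip (PySem.Str.slice nameS (some L) none)
      if tail = "" then some (code, "")
      else if PySem.Str.pyGet? tail 0 = some ',' then
        some (code, PySem.Str.strip (PySem.Str.slice tail (some 1) none))
      else pvLoopB nameS nu ix rest

def gogreen_longest_prefix_country_py_alt (name : String) (name_to_code : List (String × String)) : Option (String × String) :=
  let name := PySem.Str.strip name
  if name = "" then none
  else
    let nu := PySem.Str.upper name
    let d := PySem.Dict.ofList name_to_code
    let ix := pvIndexB d.items
    let m := d.keys.foldl (fun m k => if PySem.Str.len k > m then PySem.Str.len k else m) 0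
    pvLoopB name nu ix (PySem.List.pyRange (min (PySem.Str.len name) m) 0 (-1))

-- ===== PRECONDITION & SPEC =====
def Spec_gogreen_longest_prefix_country_py (name : String) (name_to_code : List (String × String)) (out : Option (String × String)) : Prop := out = gogreen_longest_prefix_country_py_alt name name_to_code
instance (name : String) (name_to_code : List (String × String)) (out : Option (String × String)) : Decidable (Spec_gogreen_longest_prefix_country_py name name_to_code out) := by unfold Spec_gogreen_longest_prefix_country_py; infer_instance

-- ===== CLAIM (what is proved, stated in full; the proofs are below) =====
def Claim_equal_gogreen_longest_prefix_country_py : Prop := ∀ (name : String) (name_to_code : List (String × String)), Dom_gogreen_longest_prefix_country_py name name_to_code → Spec_gogreen_longest_prefix_country_py name name_to_code (gogreen_longest_prefix_country_py name name_to_code)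

-- ===== LEMMAS AND PROOFS =====

-- The match predicate A's loop body tests: k is a usable key for the stripped name nameS.
def pvP (nameS nu k : String) : Bool :=
  !(decide (k = "" ∨ PySem.Str.len k > PySem.Str.len nameS)) &&
  (PySem.Str.slice nu none (some (PySem.Str.len k)) == PySem.Str.upper k) &&
  (let tail := PySem.Str.strip (PySem.Str.slice nameS (some (PySem.Str.len k)) none)
   (tail == "") || (PySem.Str.pyGet? tail 0 == some ','))

-- The value returned for a matching key k whose dict value is c.
def pvR (nameS c k : String) : String × String :=
  let tail := PySem.Str.strip (PySem.Str.slice nameS (some (PySem.Str.len k)) none)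
  if tail = "" then (c, "") else (c, PySem.Str.strip (PySem.Str.slice tail (some 1) none))

theorem pvP_true_iff (nameS nu k : String) : pvP nameS nu k = true ↔
    (¬(k = "" ∨ PySem.Str.len k > PySem.Str.len nameS)) ∧
    PySem.Str.slice nu none (some (PySem.Str.len k)) = PySem.Str.upper k ∧
    (PySem.Str.strip (PySem.Str.slice nameS (some (PySem.Str.len k)) none) = "" ∨
     PySem.Str.pyGet? (PySem.Str.strip (PySem.Str.slice nameS (some (PySem.Str.len k)) none)) 0 = some ',') := by
  rw [pvP]
  simp only [Bool.and_eq_true, Bool.or_eq_true, Bool.not_eq_true', decide_eq_false_iff_not, beq_iff_eq, and_assoc]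

theorem pvLen_nonneg (s : String) : 0 ≤ PySem.Str.len s := by
  simp [PySem.Str.len]

-- A's loop is find-first-match over its key list.
theorem pvLoopA_eq_find (nameS nu : String) (d : PySem.Dict String String) (ks : List String) :
    pvLoopA nameS nu d ks = (ks.find? (pvP nameS nu)).map (fun k => pvR nameS (d.getD k "") k) := by
  induction ks with
  | nil => rfl
  | cons k rest ih =>
    rw [List.find?_cons]
    by_cases h1 : (k = "" ∨ PySem.Str.len k > PySem.Str.len nameS)
    · have hp : pvP nameS nu k = false := by
        rw [Bool.eq_false_iff]; intro hc; exact ((pvP_true_iff nameS nu k).mp hc).1 h1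
      rw [hp]
      rw [show pvLoopA nameS nu d (k :: rest) = pvLoopA nameS nu d rest from by
        simp only [pvLoopA]; rw [if_pos h1]]
      exact ih
    · by_cases h2 : PySem.Str.slice nu none (some (PySem.Str.len k)) = PySem.Str.upper k
      · by_cases h3 : PySem.Str.strip (PySem.Str.slice nameS (some (PySem.Str.len k)) none) = ""
        · have hp : pvP nameS nu k = true := (pvP_true_iff nameS nu k).mpr ⟨h1, h2, Or.inl h3⟩
          rw [hp]
          show pvLoopA nameS nu d (k :: rest) = some (pvR nameS (d.getD k "") k)
          simp only [pvLoopA]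
          rw [if_neg h1, if_neg (by simpa using h2), if_pos h3]
          unfold pvR
          rw [if_pos h3]
        · by_cases h4 : PySem.Str.pyGet? (PySem.Str.strip (PySem.Str.slice nameS (some (PySem.Str.len k)) none)) 0 = some ','
          · have hp : pvP nameS nu k = true := (pvP_true_iff nameS nu k).mpr ⟨h1, h2, Or.inr h4⟩
            rw [hp]
            show pvLoopA nameS nu d (k :: rest) = some (pvR nameS (d.getD k "") k)
            simp only [pvLoopA]
            rw [if_neg h1, if_neg (by simpa using h2), if_neg h3, if_pos h4]
            unfold pvR
            rw [if_neg h3]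
          · have hp : pvP nameS nu k = false := by
              rw [Bool.eq_false_iff]; intro hc
              rcases (pvP_true_iff nameS nu k).mp hc with ⟨_, _, h | h⟩
              exacts [h3 h, h4 h]
            rw [hp]
            rw [show pvLoopA nameS nu d (k :: rest) = pvLoopA nameS nu d rest from by
              simp only [pvLoopA]
              rw [if_neg h1, if_neg (by simpa using h2), if_neg h3, if_neg h4]]
            exact ih
      · have hp : pvP nameS nu k = false := by
          rw [Bool.eq_false_iff]; intro hc; exact h2 ((pvP_true_iff nameS nu k).mp hc).2.1
        rw [hp]
        rw [show pvLoopA nameS nu d (k :: rest) = pvLoopA nameS nu d rest from by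
          simp only [pvLoopA]
          rw [if_neg h1, if_pos (by simpa using h2)]]
        exact ih

-- An abstract longest-match fold over the key list in original order (proof-side device:
-- it bridges A's sorted scan and B's descending-length probe).
def pvStepAbs (nameS nu : String) (g : String → String) (st : Option (String × String) × Int) (k : String) : Option (String × String) × Int :=
  if pvP nameS nu k = true ∧ st.2 < PySem.Str.len k then (some (pvR nameS (g k) k), PySem.Str.len k) else st

-- the reverse-sort insertion predicate of PySem.List.sorted … (key = len) true
def pvBf (a b : String) : Bool := decide (PySem.Str.len b < PySem.Str.len a)

theorem pvInsertBy_nil (bf : String → String → Bool) (x : String) :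
    PySem.List.insertBy bf x [] = [x] := by simp [PySem.List.insertBy]

theorem pvInsertBy_cons (bf : String → String → Bool) (x y : String) (ys : List String) :
    PySem.List.insertBy bf x (y :: ys) =
      if bf x y then x :: y :: ys else y :: PySem.List.insertBy bf x ys := by
  simp [PySem.List.insertBy]

-- inserting keeps the list length-nonincreasing
theorem pvInsert_pairwise (x : String) (s : List String)
    (hp : s.Pairwise (fun a b => PySem.Str.len b ≤ PySem.Str.len a)) :
    (PySem.List.insertBy pvBf x s).Pairwise (fun a b => PySem.Str.len b ≤ PySem.Str.len a) := by
  induction s with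
  | nil => simp [pvInsertBy_nil]
  | cons y ys ih =>
    rw [pvInsertBy_cons]
    rcases List.pairwise_cons.mp hp with ⟨hy, hys⟩
    by_cases hb : pvBf x y = true
    · have hxy : PySem.Str.len y < PySem.Str.len x := by simpa [pvBf] using hb
      simp only [hb, if_true]
      refine List.pairwise_cons.mpr ⟨?_, hp⟩
      intro z hz
      rcases List.mem_cons.mp hz with rfl | hz
      · omega
      · have := hy z hz; omega
    · have hxy : ¬ PySem.Str.len y < PySem.Str.len x := by simpa [pvBf] using hb
      simp only [hb]
      refine List.pairwise_cons.mpr ⟨?_, ih hys⟩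
      intro z hz
      rcases (PySem.List.mem_insertBy _ _ _ _).mp hz with rfl | hz
      · omega
      · exact hy z hz

-- how find-first-match changes when one key is inserted into a length-sorted list
theorem pvFind_insertBy (P : String → Bool) (x : String) (s : List String)
    (hp : s.Pairwise (fun a b => PySem.Str.len b ≤ PySem.Str.len a)) :
    (PySem.List.insertBy pvBf x s).find? P =
      match s.find? P with
      | none => if P x then some x else none
      | some k => if P x ∧ PySem.Str.len k < PySem.Str.len x then some x else some k := by
  induction s with
  | nil =>
    rw [pvInsertBy_nil]
    show List.find? P [x] = if P x = true then some x else none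
    by_cases hx : P x = true
    · simp [List.find?, hx]
    · simp [List.find?, hx]
  | cons y ys ih =>
    rcases List.pairwise_cons.mp hp with ⟨hy, hys⟩
    rw [pvInsertBy_cons]
    by_cases hb : pvBf x y = true
    · have hxy : PySem.Str.len y < PySem.Str.len x := by simpa [pvBf] using hb
      rw [if_pos hb]
      rcases hEq : (y :: ys).find? P with _ | k
      · show List.find? P (x :: y :: ys) = if P x = true then some x else none
        by_cases hx : P x = true
        · rw [if_pos hx]
          simp only [List.find?_cons, hx]
        · rw [if_neg hx]
          simp only [List.find?_cons, eq_false_of_ne_true hx]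
          exact hEq
      · have hk : PySem.Str.len k ≤ PySem.Str.len y := by
          rcases List.mem_cons.mp (List.mem_of_find?_eq_some hEq) with rfl | hmem
          · omega
          · exact hy k hmem
        show List.find? P (x :: y :: ys)
            = if P x = true ∧ PySem.Str.len k < PySem.Str.len x then some x else some k
        by_cases hx : P x = true
        · rw [if_pos ⟨hx, by omega⟩]
          simp only [List.find?_cons, hx]
        · rw [if_neg (fun hc => hx hc.1)]
          simp only [List.find?_cons, eq_false_of_ne_true hx]
          exact hEq
    · have hxy : ¬ PySem.Str.len y < PySem.Str.len x := by simpa [pvBf] using hb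
      rw [if_neg hb]
      by_cases hPy : P y = true
      · have hEq : (y :: ys).find? P = some y := by
          simp only [List.find?_cons, hPy]
        rw [hEq]
        show List.find? P (y :: PySem.List.insertBy pvBf x ys)
            = if P x = true ∧ PySem.Str.len y < PySem.Str.len x then some x else some y
        rw [if_neg (fun hc => hxy hc.2)]
        simp only [List.find?_cons, hPy]
      · simp only [List.find?_cons, eq_false_of_ne_true hPy]
        exact ih hys

-- loop invariant: the longest-match fold state matches find-first over the partial sorted list
def pvRel (nameS nu : String) (g : String → String) (s : List String) (st : Option (String × String) × Int) : Prop :=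
  match s.find? (pvP nameS nu) with
  | none => st = (none, -1)
  | some k => st = (some (pvR nameS (g k) k), PySem.Str.len k)

theorem pvStep_invariant (nameS nu : String) (g : String → String) (x : String)
    (s : List String) (st : Option (String × String) × Int)
    (hp : s.Pairwise (fun a b => PySem.Str.len b ≤ PySem.Str.len a))
    (hr : pvRel nameS nu g s st) :
    pvRel nameS nu g (PySem.List.insertBy pvBf x s) (pvStepAbs nameS nu g st x) := by
  unfold pvRel at *
  rw [pvFind_insertBy (pvP nameS nu) x s hp]
  rcases hEq : s.find? (pvP nameS nu) with _ | k
  · rw [hEq] at hr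
    have hst : st = (none, -1) := hr
    subst hst
    by_cases hx : pvP nameS nu x = true
    · have hlen : (-1 : Int) < PySem.Str.len x := by have := pvLen_nonneg x; omega
      show (match (if pvP nameS nu x = true then some x else none) with
        | none => _ | some k => _ : Prop)
      rw [if_pos hx]
      show pvStepAbs nameS nu g (none, -1) x = (some (pvR nameS (g x) x), PySem.Str.len x)
      unfold pvStepAbs
      rw [if_pos ⟨hx, hlen⟩]
    · show (match (if pvP nameS nu x = true then some x else none) with
        | none => _ | some k => _ : Prop)
      rw [if_neg hx]
      show pvStepAbs nameS nu g (none, -1) x = (none, -1)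
      unfold pvStepAbs
      rw [if_neg (fun hc => hx hc.1)]
  · rw [hEq] at hr
    have hst : st = (some (pvR nameS (g k) k), PySem.Str.len k) := hr
    subst hst
    by_cases hc : pvP nameS nu x = true ∧ PySem.Str.len k < PySem.Str.len x
    · show (match (if pvP nameS nu x = true ∧ PySem.Str.len k < PySem.Str.len x
          then some x else some k) with | none => _ | some k => _ : Prop)
      rw [if_pos hc]
      show pvStepAbs nameS nu g (some (pvR nameS (g k) k), PySem.Str.len k) x
          = (some (pvR nameS (g x) x), PySem.Str.len x)
      unfold pvStepAbs
      rw [if_pos ⟨hc.1, hc.2⟩]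
    · show (match (if pvP nameS nu x = true ∧ PySem.Str.len k < PySem.Str.len x
          then some x else some k) with | none => _ | some k => _ : Prop)
      rw [if_neg hc]
      show pvStepAbs nameS nu g (some (pvR nameS (g k) k), PySem.Str.len k) x
          = (some (pvR nameS (g k) k), PySem.Str.len k)
      unfold pvStepAbs
      rw [if_neg (fun h => hc ⟨h.1, h.2⟩)]

theorem pvFold_invariant (nameS nu : String) (g : String → String) (ks : List String) :
    ∀ (s : List String) (st : Option (String × String) × Int),
    s.Pairwise (fun a b => PySem.Str.len b ≤ PySem.Str.len a) →
    pvRel nameS nu g s st →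
    pvRel nameS nu g (ks.foldl (fun acc x => PySem.List.insertBy pvBf x acc) s)
      (ks.foldl (pvStepAbs nameS nu g) st) := by
  induction ks with
  | nil => intro s st _ hr; simpa using hr
  | cons x rest ih =>
    intro s st hp hr
    simp only [List.foldl_cons]
    exact ih _ _ (pvInsert_pairwise x s hp) (pvStep_invariant nameS nu g x s st hp hr)

-- ---------- B-side characterisation ----------

-- the tail after cutting L characters, and the returned pair, indexed by the cut length
def pvTail (nameS : String) (L : Int) : String :=
  PySem.Str.strip (PySem.Str.slice nameS (some L) none)

def pvRL (nameS c : String) (L : Int) : String × String :=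
  if pvTail nameS L = "" then (c, "")
  else (c, PySem.Str.strip (PySem.Str.slice (pvTail nameS L) (some 1) none))

theorem pvR_eq_pvRL (nameS c k : String) : pvR nameS c k = pvRL nameS c (PySem.Str.len k) := rfl

-- the predicate B's probe loop tests at each length L
def pvQB (nameS nu : String) (ix : PySem.Dict String String) (L : Int) : Bool :=
  (ix.get? (PySem.Str.slice nu none (some L))).isSome &&
  ((pvTail nameS L == "") || (PySem.Str.pyGet? (pvTail nameS L) 0 == some ','))

-- B's probe loop is find-first over its length list.
theorem pvLoopB_eq_find (nameS nu : String) (ix : PySem.Dict String String) (Ls : List Int) :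
    pvLoopB nameS nu ix Ls =
      (Ls.find? (pvQB nameS nu ix)).bind
        (fun L => (ix.get? (PySem.Str.slice nu none (some L))).map (fun c => pvRL nameS c L)) := by
  induction Ls with
  | nil => rfl
  | cons L rest ih =>
    rw [List.find?_cons]
    rcases hg : ix.get? (PySem.Str.slice nu none (some L)) with _ | c
    · have hq : pvQB nameS nu ix L = false := by
        unfold pvQB; rw [hg]; rfl
      rw [hq]
      rw [show pvLoopB nameS nu ix (L :: rest) = pvLoopB nameS nu ix rest from by
        simp only [pvLoopB]; rw [hg]]
      exact ih
    · by_cases h3 : pvTail nameS L = ""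
      · have hq : pvQB nameS nu ix L = true := by
          unfold pvQB; rw [hg]
          rw [show (pvTail nameS L == "") = true from by rw [beq_iff_eq]; exact h3]
          rfl
        rw [hq]
        have h3' : PySem.Str.strip (PySem.Str.slice nameS (some L) none) = "" := h3
        show pvLoopB nameS nu ix (L :: rest)
            = (ix.get? (PySem.Str.slice nu none (some L))).map (fun c => pvRL nameS c L)
        rw [hg]
        simp only [pvLoopB, Option.map_some]
        rw [hg]
        rw [show pvRL nameS c L = (c, "") from by unfold pvRL; rw [if_pos h3]]
        exact if_pos h3'
      · by_cases h4 : PySem.Str.pyGet? (pvTail nameS L) 0 = some ','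
        · have hq : pvQB nameS nu ix L = true := by
            unfold pvQB; rw [hg]
            rw [show (PySem.Str.pyGet? (pvTail nameS L) 0 == some ',') = true from by
              rw [beq_iff_eq]; exact h4]
            rw [Bool.or_true]
            rfl
          rw [hq]
          have h3' : ¬ PySem.Str.strip (PySem.Str.slice nameS (some L) none) = "" := h3
          have h4' : PySem.Str.pyGet? (PySem.Str.strip (PySem.Str.slice nameS (some L) none)) 0 = some ',' := h4
          show pvLoopB nameS nu ix (L :: rest)
              = (ix.get? (PySem.Str.slice nu none (some L))).map (fun c => pvRL nameS c L)
          rw [hg]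
          simp only [pvLoopB, Option.map_some]
          rw [hg]
          rw [show pvRL nameS c L
              = (c, PySem.Str.strip (PySem.Str.slice (pvTail nameS L) (some 1) none)) from by
            unfold pvRL; rw [if_neg h3]]
          exact (if_neg h3').trans (if_pos h4')
        · have hq : pvQB nameS nu ix L = false := by
            unfold pvQB; rw [hg]
            rw [show (pvTail nameS L == "") = false from by
              rw [beq_eq_false_iff_ne]; exact h3]
            rw [show (PySem.Str.pyGet? (pvTail nameS L) 0 == some ',') = false from by
              rw [beq_eq_false_iff_ne]; exact h4]
            rfl
          rw [hq]
          have h3' : ¬ PySem.Str.strip (PySem.Str.slice nameS (some L) none) = "" := h3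
          have h4' : ¬ PySem.Str.pyGet? (PySem.Str.strip (PySem.Str.slice nameS (some L) none)) 0 = some ',' := h4
          rw [show pvLoopB nameS nu ix (L :: rest) = pvLoopB nameS nu ix rest from by
            simp only [pvLoopB]; rw [hg]
            exact (if_neg h3').trans (if_neg h4')]
          exact ih

-- the index dict looks up the FIRST item whose uppercased key is u
theorem pvIndex_get (u : String) (items : List (String × String)) (ix0 : PySem.Dict String String) :
    (items.foldl (fun ix kc => ix.setdefault (PySem.Str.upper kc.1) kc.2) ix0).get? u =
      match ix0.get? u with
      | some v => some v
      | none => (items.find? (fun kc => PySem.Str.upper kc.1 == u)).map Prod.snd := by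
  induction items generalizing ix0 with
  | nil =>
    rcases h : ix0.get? u with _ | v <;> rw [List.foldl_nil, h] <;> rfl
  | cons kc rest ih =>
    rw [List.foldl_cons, ih, List.find?_cons]
    by_cases hu : u = PySem.Str.upper kc.1
    · subst hu
      rw [PySem.Dict.get?_setdefault_self ix0 (PySem.Str.upper kc.1) kc.2]
      rw [show (PySem.Str.upper kc.1 == PySem.Str.upper kc.1) = true from beq_self_eq_true _]
      rcases h0 : ix0.get? (PySem.Str.upper kc.1) with _ | v <;> rfl
    · rw [PySem.Dict.get?_setdefault_of_ne ix0 kc.2 hu]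
      rw [show (PySem.Str.upper kc.1 == u) = false from by
        rw [beq_eq_false_iff_ne]; exact fun h => hu h.symm]

-- length bookkeeping
theorem pvLen_upper (s : String) : PySem.Str.len (PySem.Str.upper s) = PySem.Str.len s := by
  simp [PySem.Str.len, PySem.Str.toList_upper, PySem.Chars.upper]

theorem pvLen_pos_iff (s : String) : 0 < PySem.Str.len s ↔ s ≠ "" := by
  rw [PySem.Str.len]
  rw [show (s ≠ "") ↔ ¬ s.toList = [] from by rw [String.toList_eq_nil_iff]]
  rw [Int.natCast_pos, List.length_pos_iff]

theorem pvLen_slice_to (s : String) (L : Int) (h0 : 0 ≤ L) (h1 : L ≤ PySem.Str.len s) :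
    PySem.Str.len (PySem.Str.slice s none (some L)) = L := by
  rw [PySem.Str.len] at h1
  rw [PySem.Str.len, PySem.Str.slice, PySem.Chars.slice_eq_listSlice,
    PySem.List.slice_to s.toList h0, String.toList_ofList, List.length_take]
  omega

-- find? only looks at members
theorem pvFind?_congr {α : Type} (l : List α) (p q : α → Bool) (h : ∀ x ∈ l, p x = q x) :
    l.find? p = l.find? q := by
  induction l with
  | nil => rfl
  | cons x xs ih =>
    simp only [List.find?_cons]
    rw [h x (by simp)]
    cases q x
    · exact ih (fun y hy => h y (by simp [hy]))
    · rfl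

-- descending range find?: none when the predicate fails everywhere on 1..n
theorem pvRangeFind_none (pb : Int → Bool) (n : Int)
    (h : ∀ L, 0 < L → L ≤ n → pb L = false) :
    (PySem.List.pyRange n 0 (-1)).find? pb = none := by
  rw [List.find?_eq_none]
  intro L hL
  rw [PySem.List.mem_pyRange_neg_one] at hL
  simp [h L hL.1 hL.2]

-- descending range find?: the first true length when everything above it fails
theorem pvRangeFind_some (pb : Int → Bool) (L0 : Int) (h1 : 0 < L0) (hp : pb L0 = true) :
    ∀ (dn : Nat) (n : Int), n - L0 = dn →
    (∀ L, L0 < L → L ≤ n → pb L = false) →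
    (PySem.List.pyRange n 0 (-1)).find? pb = some L0 := by
  intro dn
  induction dn with
  | zero =>
    intro n hd _
    have hn : n = L0 := by omega
    rw [hn]
    rw [PySem.List.pyRange_neg_one_cons (by omega : (0:Int) < L0)]
    simp [hp]
  | succ m ih =>
    intro n hd habove
    have hlt : L0 < n := by omega
    rw [PySem.List.pyRange_neg_one_cons (by omega : (0:Int) < n)]
    rw [List.find?_cons]
    rw [habove n hlt (le_refl n)]
    exact ih (n - 1) (by omega) (fun L hL1 hL2 => habove L hL1 (by omega))

theorem pvMaxLen (ks : List String) : ∀ a : Int,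
    a ≤ ks.foldl (fun m k => if PySem.Str.len k > m then PySem.Str.len k else m) a ∧
    ∀ k ∈ ks, PySem.Str.len k ≤ ks.foldl (fun m k => if PySem.Str.len k > m then PySem.Str.len k else m) a := by
  induction ks with
  | nil => intro a; exact ⟨le_refl a, by simp⟩
  | cons k ks ih =>
    intro a
    simp only [List.foldl_cons]
    have h1 : a ≤ (if PySem.Str.len k > a then PySem.Str.len k else a) ∧
        PySem.Str.len k ≤ (if PySem.Str.len k > a then PySem.Str.len k else a) := by
      split_ifs with h
      · exact ⟨by omega, by omega⟩
      · exact ⟨by omega, by omega⟩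
    refine ⟨le_trans h1.1 (ih _).1, ?_⟩
    intro x hx
    rcases List.mem_cons.mp hx with rfl | hx
    · exact le_trans h1.2 (ih _).1
    · exact (ih _).2 x hx

theorem pvOr_mp {a b : Bool} (h : (a || b) = true) : a = true ∨ b = true := by
  cases a <;> cases b <;> simp_all

theorem pvAnd_mp {a b : Bool} (h : (a && b) = true) : a = true ∧ b = true := by
  cases a <;> cases b <;> simp_all

-- the longest-match fold, characterised over the original key order
theorem pvP_len_bounds (nameS nu k : String) (h : pvP nameS nu k = true) :
    0 < PySem.Str.len k ∧ PySem.Str.len k ≤ PySem.Str.len nameS := by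
  rcases (pvP_true_iff nameS nu k).mp h with ⟨h1, -, -⟩
  push Not at h1
  exact ⟨(pvLen_pos_iff k).mpr h1.1, h1.2⟩

theorem pvFoldAbs_char (nameS nu : String) (g : String → String) (ks : List String) :
    ((∀ k ∈ ks, pvP nameS nu k = false) ∧
      ks.foldl (pvStepAbs nameS nu g) (none, -1) = (none, -1)) ∨
    (∃ L0 k0, 0 < L0 ∧ L0 ≤ PySem.Str.len nameS ∧
      (∀ k ∈ ks, pvP nameS nu k = true → PySem.Str.len k ≤ L0) ∧
      ks.find? (fun k => pvP nameS nu k && (PySem.Str.len k == L0)) = some k0 ∧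
      ks.foldl (pvStepAbs nameS nu g) (none, -1) = (some (pvR nameS (g k0) k0), L0)) := by
  induction ks using List.reverseRecOn with
  | nil => left; exact ⟨by simp, rfl⟩
  | append_singleton p k ih =>
    by_cases hk : pvP nameS nu k = true
    · rcases pvP_len_bounds nameS nu k hk with ⟨hkpos, hkle⟩
      rcases ih with ⟨hall, hF⟩ | ⟨L0, k0, hL0pos, hL0le, hmax, hfind, hF⟩
      · right
        refine ⟨PySem.Str.len k, k, hkpos, hkle, ?_, ?_, ?_⟩
        · intro k' hk' hp'
          rcases List.mem_append.mp hk' with h | h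
          · rw [hall k' h] at hp'; cases hp'
          · rcases List.mem_singleton.mp h with rfl; exact le_refl _
        · rw [List.find?_append,
            List.find?_eq_none.mpr (fun x hx hc =>
              by rw [hall x hx] at hc; exact Bool.false_ne_true (pvAnd_mp hc).1)]
          simp [hk]
        · rw [List.foldl_append, hF, List.foldl_cons, List.foldl_nil]
          unfold pvStepAbs
          rw [if_pos ⟨hk, by omega⟩]
      · by_cases hlt : L0 < PySem.Str.len k
        · right
          refine ⟨PySem.Str.len k, k, hkpos, hkle, ?_, ?_, ?_⟩
          · intro k' hk' hp'
            rcases List.mem_append.mp hk' with h | h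
            · exact le_trans (hmax k' h hp') (le_of_lt hlt)
            · rcases List.mem_singleton.mp h with rfl; exact le_refl _
          · rw [List.find?_append,
              List.find?_eq_none.mpr (fun x hx hc => by
                rcases pvAnd_mp hc with ⟨hpx, hlx⟩
                rw [beq_iff_eq] at hlx
                have := hmax x hx hpx
                omega)]
            simp [hk]
          · rw [List.foldl_append, hF, List.foldl_cons, List.foldl_nil]
            unfold pvStepAbs
            rw [if_pos ⟨hk, hlt⟩]
        · right
          refine ⟨L0, k0, hL0pos, hL0le, ?_, ?_, ?_⟩
          · intro k' hk' hp'
            rcases List.mem_append.mp hk' with h | h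
            · exact hmax k' h hp'
            · rcases List.mem_singleton.mp h with rfl; omega
          · rw [List.find?_append, hfind]; rfl
          · rw [List.foldl_append, hF, List.foldl_cons, List.foldl_nil]
            unfold pvStepAbs
            rw [if_neg (fun hc => hlt hc.2)]
    · have hkf : pvP nameS nu k = false := eq_false_of_ne_true hk
      rcases ih with ⟨hall, hF⟩ | ⟨L0, k0, hL0pos, hL0le, hmax, hfind, hF⟩
      · left
        constructor
        · intro k' hk'
          rcases List.mem_append.mp hk' with h | h
          · exact hall k' h
          · rcases List.mem_singleton.mp h with rfl; exact hkf
        · rw [List.foldl_append, hF, List.foldl_cons, List.foldl_nil]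
          unfold pvStepAbs
          rw [if_neg (fun hc => by rw [hkf] at hc; exact Bool.false_ne_true hc.1)]
      · right
        refine ⟨L0, k0, hL0pos, hL0le, ?_, ?_, ?_⟩
        · intro k' hk' hp'
          rcases List.mem_append.mp hk' with h | h
          · exact hmax k' h hp'
          · rcases List.mem_singleton.mp h with rfl; rw [hkf] at hp'; cases hp'
        · rw [List.find?_append, hfind]; rfl
        · rw [List.foldl_append, hF, List.foldl_cons, List.foldl_nil]
          unfold pvStepAbs
          rw [if_neg (fun hc => by rw [hkf] at hc; exact Bool.false_ne_true hc.1)]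

-- ===== VERDICT (by name: the statement is the Claim_ definition above) =====
theorem gogreen_longest_prefix_country_py_spec : Claim_equal_gogreen_longest_prefix_country_py := by
  intro name name_to_code _hdom
  unfold Spec_gogreen_longest_prefix_country_py
  unfold gogreen_longest_prefix_country_py gogreen_longest_prefix_country_py_alt
  by_cases h0 : PySem.Str.strip name = ""
  · simp [h0]
  · simp only [h0, if_false]
    set nameS := PySem.Str.strip name with hnameS
    set d := PySem.Dict.ofList name_to_code with hd
    set nu := PySem.Str.upper nameS with hnu
    set g : String → String := fun k => d.getD k "" with hg
    set n := PySem.Str.len nameS with hn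
    have hA : pvLoopA nameS nu d (PySem.List.sorted d.keys (fun k => PySem.Str.len k) true)
        = ((d.keys.foldl (fun acc x => PySem.List.insertBy pvBf x acc) []).find? (pvP nameS nu)).map
            (fun k => pvR nameS (g k) k) := by
      rw [pvLoopA_eq_find]
      rw [PySem.List.sorted_rev_eq_foldl_insertBy]
      rfl
    have hinv := pvFold_invariant nameS nu g d.keys [] (none, -1) (by simp) (by simp [pvRel])
    unfold pvRel at hinv
    have hAF : pvLoopA nameS nu d (PySem.List.sorted d.keys (fun k => PySem.Str.len k) true)
        = (d.keys.foldl (pvStepAbs nameS nu g) (none, -1)).1 := by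
      rw [hA]
      rcases hEq : (d.keys.foldl (fun acc x => PySem.List.insertBy pvBf x acc) []).find? (pvP nameS nu) with _ | k
      · rw [hEq] at hinv; rw [hinv]; rfl
      · rw [hEq] at hinv; rw [hinv]; rfl
    set ix := pvIndexB d.items with hix
    set mk := d.keys.foldl (fun m k => if PySem.Str.len k > m then PySem.Str.len k else m) 0 with hmk
    have hmk_ge : ∀ k ∈ d.keys, PySem.Str.len k ≤ mk := by
      rw [hmk]; exact (pvMaxLen d.keys 0).2
    have hnu_len : PySem.Str.len nu = n := by rw [hnu]; exact pvLen_upper nameS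
    have hIxGet : ∀ u, ix.get? u = (d.keys.find? (fun k => PySem.Str.upper k == u)).map g := by
      intro u
      rw [hix]
      unfold pvIndexB
      rw [pvIndex_get u d.items PySem.Dict.empty]
      rw [PySem.Dict.get?_empty]
      rw [PySem.Dict.items_eq_map_keys d (PySem.Dict.nodup_keys_ofList name_to_code) ""]
      rw [List.find?_map]
      rw [Option.map_map]
      rfl
    have hKeyLen : ∀ (L : Int) (k : String), 0 < L → L ≤ n →
        PySem.Str.upper k = PySem.Str.slice nu none (some L) → PySem.Str.len k = L := by
      intro L k hL1 hL2 he
      have hs := pvLen_slice_to nu L (by omega) (by omega)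
      rw [← he, pvLen_upper] at hs
      exact hs
    have hPQ : ∀ (L : Int), 0 < L → L ≤ n →
        (pvTail nameS L = "" ∨ PySem.Str.pyGet? (pvTail nameS L) 0 = some ',') →
        ∀ k, (PySem.Str.upper k == PySem.Str.slice nu none (some L))
            = (pvP nameS nu k && (PySem.Str.len k == L)) := by
      intro L hL1 hL2 htc k
      by_cases he : PySem.Str.upper k = PySem.Str.slice nu none (some L)
      · have hlen := hKeyLen L k hL1 hL2 he
        have hp : pvP nameS nu k = true := by
          rw [pvP_true_iff]
          refine ⟨?_, ?_, ?_⟩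
          · push Not
            refine ⟨?_, ?_⟩
            · rw [← pvLen_pos_iff]; omega
            · omega
          · rw [hlen]; exact he.symm
          · rw [hlen]; exact htc
        rw [hp]
        simp [he]
        exact hlen
      · rw [show (PySem.Str.upper k == PySem.Str.slice nu none (some L)) = false from by
          rw [beq_eq_false_iff_ne]; exact he]
        symm
        rw [Bool.eq_false_iff]
        intro hc
        rcases pvAnd_mp hc with ⟨hpk, hlk⟩
        rw [beq_iff_eq] at hlk
        rcases (pvP_true_iff nameS nu k).mp hpk with ⟨-, he2, -⟩
        rw [hlk] at he2
        exact he he2.symm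
    rcases pvFoldAbs_char nameS nu g d.keys with ⟨hall, hF⟩ | ⟨L0, k0, hL0pos, hL0le, hmax, hfind, hF⟩
    · have hnone : (PySem.List.pyRange (min n mk) 0 (-1)).find? (pvQB nameS nu ix) = none := by
        apply pvRangeFind_none
        intro L hL1 hL2'
        have hL2 : L ≤ n := le_trans hL2' (min_le_left _ _)
        rw [Bool.eq_false_iff]
        intro hq
        rcases pvAnd_mp hq with ⟨hsome, htc⟩
        rw [hIxGet, Option.isSome_map] at hsome
        rcases List.find?_isSome.mp hsome with ⟨k', hk'mem, hk'pred⟩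
        have htcP : pvTail nameS L = "" ∨ PySem.Str.pyGet? (pvTail nameS L) 0 = some ',' := by
          rcases pvOr_mp htc with h | h
          · left; rw [beq_iff_eq] at h; exact h
          · right; rw [beq_iff_eq] at h; exact h
        rw [hPQ L hL1 hL2 htcP k'] at hk'pred
        rcases pvAnd_mp hk'pred with ⟨hpk', -⟩
        rw [hall k' hk'mem] at hpk'
        exact Bool.false_ne_true hpk'
      rw [hAF, hF, pvLoopB_eq_find, hnone]
      rfl
    · have hk0 := List.find?_some hfind
      rcases pvAnd_mp hk0 with ⟨hpk0, hlen0b⟩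
      rw [beq_iff_eq] at hlen0b
      rcases (pvP_true_iff nameS nu k0).mp hpk0 with ⟨-, hslice0, htail0⟩
      have htcP : pvTail nameS L0 = "" ∨ PySem.Str.pyGet? (pvTail nameS L0) 0 = some ',' := by
        rw [← hlen0b]
        exact htail0
      have hfind2 : d.keys.find? (fun k => PySem.Str.upper k == PySem.Str.slice nu none (some L0)) = some k0 := by
        rw [pvFind?_congr _ _ _ (fun k _ => hPQ L0 hL0pos hL0le htcP k)]
        exact hfind
      have hQL0 : pvQB nameS nu ix L0 = true := by
        unfold pvQB
        rw [hIxGet, hfind2]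
        rcases htcP with h | h
        · rw [show (pvTail nameS L0 == "") = true from by rw [beq_iff_eq]; exact h]
          rfl
        · rw [show (PySem.Str.pyGet? (pvTail nameS L0) 0 == some ',') = true from by
            rw [beq_iff_eq]; exact h]
          rw [Bool.or_true]
          rfl
      have habove : ∀ L, L0 < L → L ≤ n → pvQB nameS nu ix L = false := by
        intro L hL1 hL2
        rw [Bool.eq_false_iff]
        intro hq
        rcases pvAnd_mp hq with ⟨hsome, htc⟩
        rw [hIxGet, Option.isSome_map] at hsome
        rcases List.find?_isSome.mp hsome with ⟨k', hk'mem, hk'pred⟩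
        have htcP' : pvTail nameS L = "" ∨ PySem.Str.pyGet? (pvTail nameS L) 0 = some ',' := by
          rcases pvOr_mp htc with h | h
          · left; rw [beq_iff_eq] at h; exact h
          · right; rw [beq_iff_eq] at h; exact h
        rw [hPQ L (by omega) hL2 htcP' k'] at hk'pred
        rcases pvAnd_mp hk'pred with ⟨hpk', hlk'⟩
        rw [beq_iff_eq] at hlk'
        have := hmax k' hk'mem hpk'
        omega
      have hk0mem := List.mem_of_find?_eq_some hfind
      have hL0le' : L0 ≤ min n mk := le_min hL0le (hlen0b ▸ hmk_ge k0 hk0mem)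
      have habove' : ∀ L, L0 < L → L ≤ min n mk → pvQB nameS nu ix L = false :=
        fun L h1 h2 => habove L h1 (le_trans h2 (min_le_left _ _))
      have hRange : (PySem.List.pyRange (min n mk) 0 (-1)).find? (pvQB nameS nu ix) = some L0 :=
        pvRangeFind_some (pvQB nameS nu ix) L0 hL0pos hQL0 (min n mk - L0).toNat (min n mk)
          (by omega) habove'
      rw [hAF, hF, pvLoopB_eq_find, hRange]
      show some (pvR nameS (g k0) k0)
          = (ix.get? (PySem.Str.slice nu none (some L0))).map (fun c => pvRL nameS c L0)
      rw [hIxGet, hfind2]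
      simp only [Option.map_some]
      rw [pvR_eq_pvRL, hlen0b]
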